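-- pv_equiv track=rewrite | github.com/nkchangliu/puzzles | leetcode/flap_card.py | smallest_back
-- ===== SOURCE A (Python) =====
-- def smallest_back(front, back):
--     all_num = set()
--     dup_num = set()
--     for i in range(len(front)):
--         all_num.add(front[i])
--         all_num.add(back[i])
--         if front[i] == back[i]:
--             dup_num.add(front[i])
--     non_dup = all_num.difference(dup_num)
--     return min(non_dup) if len(non_dup) != 0 else 0
-- ===== SOURCE B (Python) =====
-- def smallest_back(front, back):
--     # Sort candidates (values at differing positions) and forbidden values
--     # (values at equal positions), then merge-scan: the first candidate not
--     # present in the sorted forbidden list is the answer.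
--     cand = sorted(x for f, b in zip(front, back) if f != b for x in (f, b))
--     forb = sorted(f for f, b in zip(front, back) if f == b)
--     j = 0
--     for c in cand:
--         while j < len(forb) and forb[j] < c:
--             j += 1
--         if j == len(forb) or forb[j] != c:
--             return c
--     return 0
-- ===== Notes on version B (the rewrite author's own statement) =====
-- stated objective: alternative
-- what changed: B replaces A's two hash sets and set-difference/min by sorting the candidate values (differing positions) and the forbidden values (equal positions) and doing a two-pointer merge scan that returns the first candidate missing from the forbidden list.
-- outside the precondition, e.g. on smallest_back([1, 2], [1]): A raises IndexError, B returns 0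
import Mathlib
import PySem

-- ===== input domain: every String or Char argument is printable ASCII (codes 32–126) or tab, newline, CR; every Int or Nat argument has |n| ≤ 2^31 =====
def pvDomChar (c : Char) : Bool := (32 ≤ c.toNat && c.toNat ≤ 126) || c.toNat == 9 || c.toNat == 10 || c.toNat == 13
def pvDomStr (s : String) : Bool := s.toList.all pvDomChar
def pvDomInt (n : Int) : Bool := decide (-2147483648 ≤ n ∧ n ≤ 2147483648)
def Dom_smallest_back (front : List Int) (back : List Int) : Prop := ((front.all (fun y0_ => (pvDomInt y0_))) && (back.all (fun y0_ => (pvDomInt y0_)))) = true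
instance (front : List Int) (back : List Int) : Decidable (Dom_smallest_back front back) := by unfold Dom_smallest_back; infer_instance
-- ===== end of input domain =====

-- B replaces A's hash sets and set-difference/min by sorting candidates and forbidden
-- values and doing a two-pointer merge scan; a different algorithm of similar cost.

-- ===== PORT A =====
def smallest_back (front : List Int) (back : List Int) : Int :=
  let st := (PySem.List.pyRange 0 (front.length : Int) 1).foldl
    (fun (st : PySem.Set Int × PySem.Set Int) i =>
      let f := PySem.List.pyGetD front i 0   -- exact: i ranges over valid indices of front
      let b := PySem.List.pyGetD back i 0    -- exact under Pre_ (front.length ≤ back.length)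
      (PySem.Set.add (PySem.Set.add st.1 f) b,
       if f = b then PySem.Set.add st.2 f else st.2))
    (PySem.Set.empty, PySem.Set.empty)
  let non_dup := PySem.Set.diff st.1 st.2
  if non_dup.length ≠ 0 then (PySem.List.min? non_dup (fun x => x)).getD 0 else 0

-- ===== PORT B =====
-- the 'for c in cand' loop of Source B; the inner 'while' advancing j is dropWhile on
-- the remaining suffix of forb (exact: forb[j:] with j advanced past elements < c)
def pvScan (cand forb : List Int) : Int :=
  match cand with
  | [] => 0
  | c :: cs =>
    let forb' := forb.dropWhile (fun y => decide (y < c))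
    if forb'.head? ≠ some c then c else pvScan cs forb'

def smallest_back_alt (front : List Int) (back : List Int) : Int :=
  let pairs := front.zip back
  let cand := PySem.List.sorted
    (pairs.flatMap (fun p => if p.1 ≠ p.2 then [p.1, p.2] else [])) (fun x => x) false
  let forb := PySem.List.sorted
    ((pairs.filter (fun p => p.1 == p.2)).map Prod.fst) (fun x => x) false
  pvScan cand forb

-- ===== PRECONDITION & SPEC =====
-- A raises IndexError (back[i]) when back is shorter than front; excluded.
def Pre_smallest_back (front : List Int) (back : List Int) : Prop := front.length ≤ back.length
instance (front : List Int) (back : List Int) : Decidable (Pre_smallest_back front back) := by unfold Pre_smallest_back; infer_instance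
def pvWitness_smallest_back : List Int × List Int := ([1, 2], [1, 3])

def Spec_smallest_back (front : List Int) (back : List Int) (out : Int) : Prop := out = smallest_back_alt front back
instance (front : List Int) (back : List Int) (out : Int) : Decidable (Spec_smallest_back front back out) := by unfold Spec_smallest_back; infer_instance

-- ===== CLAIM (what is proved, stated in full; the proofs are below) =====
def Claim_equal_smallest_back : Prop := ∀ (front : List Int) (back : List Int), Dom_smallest_back front back → Pre_smallest_back front back → Spec_smallest_back front back (smallest_back front back)

-- ===== LEMMAS AND PROOFS =====

-- A's index loop over two lists equals a fold over their zip (under the length precondition).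
theorem pv_loop2 {σ : Type} (g : σ → Int → Int → σ) :
    ∀ (front back : List Int), front.length ≤ back.length → ∀ (st : σ),
      (PySem.List.pyRange 0 (front.length : Int) 1).foldl
        (fun st i => g st (PySem.List.pyGetD front i 0) (PySem.List.pyGetD back i 0)) st
      = (front.zip back).foldl (fun st p => g st p.1 p.2) st := by
  intro front back h st
  have aux : ∀ (k : Nat) (st : σ),
      (PySem.List.pyRange (k : Int) (front.length : Int) 1).foldl
        (fun st i => g st (PySem.List.pyGetD front i 0) (PySem.List.pyGetD back i 0)) st
      = ((front.drop k).zip (back.drop k)).foldl (fun st p => g st p.1 p.2) st := by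
    intro k
    induction hn : front.length - k generalizing k with
    | zero =>
      intro st
      have hk : front.length ≤ k := by omega
      rw [PySem.List.pyRange_one_eq_nil (by exact_mod_cast hk)]
      rw [List.drop_eq_nil_of_le hk]
      simp
    | succ n ih =>
      intro st
      have hk : k < front.length := by omega
      have hkb : k < back.length := lt_of_lt_of_le hk h
      rw [PySem.List.pyRange_one_cons (by exact_mod_cast hk)]
      rw [List.foldl_cons]
      rw [PySem.List.pyGetD_natCast front k 0, PySem.List.pyGetD_natCast back k 0]
      have h1 : ((k : Int) + 1) = ((k + 1 : Nat) : Int) := by push_cast; ring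
      rw [h1, ih (k + 1) (by omega), List.drop_eq_getElem_cons hk, List.drop_eq_getElem_cons hkb,
          List.zip_cons_cons, List.foldl_cons, List.getD_eq_getElem front 0 hk,
          List.getD_eq_getElem back 0 hkb]
  have := aux 0 st
  simpa using this

theorem pv_mem_loop (pairs : List (Int × Int)) (s : PySem.Set Int × PySem.Set Int) (x : Int) :
    (x ∈ (pairs.foldl (fun (st : PySem.Set Int × PySem.Set Int) p =>
        (PySem.Set.add (PySem.Set.add st.1 p.1) p.2,
         if p.1 = p.2 then PySem.Set.add st.2 p.1 else st.2)) s).1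
      ↔ x ∈ s.1 ∨ ∃ p ∈ pairs, x = p.1 ∨ x = p.2) ∧
    (x ∈ (pairs.foldl (fun (st : PySem.Set Int × PySem.Set Int) p =>
        (PySem.Set.add (PySem.Set.add st.1 p.1) p.2,
         if p.1 = p.2 then PySem.Set.add st.2 p.1 else st.2)) s).2
      ↔ x ∈ s.2 ∨ ∃ p ∈ pairs, p.1 = p.2 ∧ x = p.1) := by
  induction pairs generalizing s with
  | nil => simp
  | cons p t ih =>
    simp only [List.foldl_cons]
    constructor
    · rw [(ih _).1]
      by_cases hp : p.1 = p.2 <;>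
        simp [hp, PySem.Set.mem_add, List.mem_cons, or_assoc]
    · rw [(ih _).2]
      by_cases hp : p.1 = p.2 <;>
        simp [hp, PySem.Set.mem_add, List.mem_cons, or_assoc]

theorem pv_min_congr (l1 l2 : List Int) (h : ∀ x, x ∈ l1 ↔ x ∈ l2) :
    PySem.List.min? l1 (fun x => x) = PySem.List.min? l2 (fun x => x) := by
  cases h1 : PySem.List.min? l1 (fun x => x) with
  | none =>
    cases h2 : PySem.List.min? l2 (fun x => x) with
    | none => rfl
    | some m =>
      have hm : m ∈ l2 := PySem.List.min?_mem h2
      have : l1 = [] := (PySem.List.min?_eq_none_iff _ _).1 h1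
      rw [this] at h
      exact absurd ((h m).2 hm) (List.not_mem_nil)
  | some m1 =>
    cases h2 : PySem.List.min? l2 (fun x => x) with
    | none =>
      have hm : m1 ∈ l1 := PySem.List.min?_mem h1
      have : l2 = [] := (PySem.List.min?_eq_none_iff _ _).1 h2
      rw [this] at h
      exact absurd ((h m1).1 hm) (List.not_mem_nil)
    | some m2 =>
      have hm1 : m1 ∈ l1 := PySem.List.min?_mem h1
      have hm2 : m2 ∈ l2 := PySem.List.min?_mem h2
      have hle1 : m1 ≤ m2 := PySem.List.min?_isMin h1 m2 ((h m2).2 hm2)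
      have hle2 : m2 ≤ m1 := PySem.List.min?_isMin h2 m1 ((h m1).1 hm1)
      rw [le_antisymm hle1 hle2]

-- dropping elements < c cannot remove any x ≥ c
theorem pv_mem_dropWhile (forb : List Int) (c x : Int) (hcx : c ≤ x) :
    x ∈ forb.dropWhile (fun y => decide (y < c)) ↔ x ∈ forb := by
  constructor
  · intro hx
    exact (List.dropWhile_sublist _).mem hx
  · intro hx
    rw [← List.takeWhile_append_dropWhile (p := fun y => decide (y < c)) (l := forb)] at hx
    rcases List.mem_append.1 hx with h | h
    · have := List.mem_takeWhile_imp h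
      simp at this; omega
    · exact h

-- on a sorted list, c is a member iff it is the head after dropping elements < c
theorem pv_head_detect (forb : List Int) (c : Int) (hs : forb.Pairwise (· ≤ ·)) :
    (forb.dropWhile (fun y => decide (y < c))).head? = some c ↔ c ∈ forb := by
  induction forb with
  | nil => simp
  | cons f t ih =>
    rcases List.pairwise_cons.1 hs with ⟨hf, ht⟩
    by_cases hlt : f < c
    · rw [List.dropWhile_cons_of_pos (by simp [hlt])]
      rw [ih ht]
      simp only [List.mem_cons]
      constructor
      · exact Or.inr
      · rintro (h | h)
        · omega
        · exact h
    · rw [List.dropWhile_cons_of_neg (by simp [hlt])]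
      simp only [List.head?_cons, Option.some_inj, List.mem_cons]
      constructor
      · intro h; exact Or.inl h.symm
      · rintro (h | h)
        · exact h.symm
        · have := hf c h; omega

-- the merge scan on sorted lists returns the first candidate not in forb (default 0)
theorem pv_scan_spec (cand : List Int) : ∀ (forb : List Int),
    cand.Pairwise (· ≤ ·) → forb.Pairwise (· ≤ ·) →
    pvScan cand forb = ((cand.filter (fun x => decide (x ∉ forb))).head?).getD 0 := by
  induction cand with
  | nil => intro forb _ _; rfl
  | cons c cs ih =>
    intro forb hc hf
    rcases List.pairwise_cons.1 hc with ⟨hcall, hcs⟩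
    have hf' : (forb.dropWhile (fun y => decide (y < c))).Pairwise (· ≤ ·) :=
      List.Pairwise.sublist (List.dropWhile_sublist _) hf
    unfold pvScan
    by_cases hh : (forb.dropWhile (fun y => decide (y < c))).head? = some c
    · have hcf : c ∈ forb := (pv_head_detect forb c hf).1 hh
      rw [if_neg (by simpa using hh)]
      rw [ih _ hcs hf']
      have hfilter : cs.filter (fun x => decide (x ∉ forb.dropWhile (fun y => decide (y < c))))
          = cs.filter (fun x => decide (x ∉ forb)) := by
        apply List.filter_congr
        intro x hx
        have : c ≤ x := hcall x hx
        simp [pv_mem_dropWhile forb c x this]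
      rw [hfilter, List.filter_cons, if_neg (by simp [hcf])]
    · have hcf : c ∉ forb := fun h => hh ((pv_head_detect forb c hf).2 h)
      rw [if_pos (by simpa using hh)]
      rw [List.filter_cons, if_pos (by simp [hcf]), List.head?_cons, Option.getD_some]

-- on a pairwise-≤ list, min? is the head
theorem pv_min_head (l : List Int) (hs : l.Pairwise (· ≤ ·)) :
    PySem.List.min? l (fun x => x) = l.head? := by
  cases l with
  | nil => rw [(PySem.List.min?_eq_none_iff _ _).2 rfl]; rfl
  | cons h t =>
    cases hm : PySem.List.min? (h :: t) (fun x => x) with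
    | none =>
      have := (PySem.List.min?_eq_none_iff _ _).1 hm
      cases this
    | some m =>
      have hmem : m ∈ h :: t := PySem.List.min?_mem hm
      have h1 : m ≤ h := PySem.List.min?_isMin hm h (List.mem_cons_self)
      have h2 : h ≤ m := by
        rcases List.mem_cons.1 hmem with he | hmt
        · omega
        · exact (List.pairwise_cons.1 hs).1 m hmt
      rw [List.head?_cons, le_antisymm h1 h2]

theorem smallest_back_eq (front back : List Int) (hl : front.length ≤ back.length) :
    smallest_back front back = smallest_back_alt front back := by
  have hloop := pv_loop2 (fun (st : PySem.Set Int × PySem.Set Int) f b =>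
      (PySem.Set.add (PySem.Set.add st.1 f) b,
       if f = b then PySem.Set.add st.2 f else st.2)) front back hl
      (PySem.Set.empty, PySem.Set.empty)
  unfold smallest_back smallest_back_alt
  simp only []
  rw [hloop]
  set pairs := front.zip back with hpairs
  set st := pairs.foldl (fun (st : PySem.Set Int × PySem.Set Int) p =>
      (PySem.Set.add (PySem.Set.add st.1 p.1) p.2,
       if p.1 = p.2 then PySem.Set.add st.2 p.1 else st.2))
      (PySem.Set.empty, PySem.Set.empty) with hst
  set non_dup := PySem.Set.diff st.1 st.2 with hnd
  set rawc := pairs.flatMap (fun p => if p.1 ≠ p.2 then [p.1, p.2] else []) with hrawc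
  set rawf := (pairs.filter (fun p => p.1 == p.2)).map Prod.fst with hrawf
  set cand := PySem.List.sorted rawc (fun x => x) false with hcand
  set forb := PySem.List.sorted rawf (fun x => x) false with hforb
  have hcs : cand.Pairwise (· ≤ ·) := by
    have := PySem.List.sorted_pairwise (xs := rawc) (key := fun x => x)
    simpa using this
  have hfs : forb.Pairwise (· ≤ ·) := by
    have := PySem.List.sorted_pairwise (xs := rawf) (key := fun x => x)
    simpa using this
  rw [pv_scan_spec cand forb hcs hfs]
  set L := cand.filter (fun x => decide (x ∉ forb)) with hL
  have hLs : L.Pairwise (· ≤ ·) := hcs.filter _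
  -- membership characterizations
  have hmemf : ∀ x : Int, x ∈ forb ↔ ∃ p ∈ pairs, p.1 = p.2 ∧ x = p.1 := by
    intro x
    rw [hforb, PySem.List.mem_sorted, hrawf]
    simp only [List.mem_map, List.mem_filter, beq_iff_eq]
    constructor
    · rintro ⟨p, ⟨hp, he⟩, hx⟩; exact ⟨p, hp, he, hx.symm⟩
    · rintro ⟨p, hp, he, hx⟩; exact ⟨p, ⟨hp, he⟩, hx.symm⟩
  have hmemL : ∀ x : Int, x ∈ L ↔ x ∈ non_dup := by
    intro x
    have hall := (pv_mem_loop pairs (PySem.Set.empty, PySem.Set.empty) x).1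
    have hdup := (pv_mem_loop pairs (PySem.Set.empty, PySem.Set.empty) x).2
    rw [← hst] at hall hdup
    rw [hnd, PySem.Set.mem_diff, hall, hdup]
    rw [hL, List.mem_filter]
    simp only [decide_eq_true_eq, PySem.Set.empty, List.not_mem_nil, false_or]
    rw [hcand, PySem.List.mem_sorted, hrawc, hmemf]
    constructor
    · rintro ⟨hxc, hnf⟩
      rcases List.mem_flatMap.1 hxc with ⟨p, hp, hm⟩
      by_cases he : p.1 = p.2
      · rw [if_neg (by simp [he])] at hm; cases hm
      · rw [if_pos he] at hm
        exact ⟨⟨p, hp, by simpa using hm⟩, hnf⟩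
    · rintro ⟨⟨p, hp, hx⟩, hnd2⟩
      have hne : p.1 ≠ p.2 := by
        intro he
        exact hnd2 ⟨p, hp, he, by rcases hx with h | h <;> omega⟩
      refine ⟨List.mem_flatMap.2 ⟨p, hp, ?_⟩, hnd2⟩
      rw [if_pos hne]; simpa using hx
  have hminL : PySem.List.min? non_dup (fun x => x) = L.head? := by
    rw [pv_min_congr non_dup L (fun x => (hmemL x).symm)]
    exact pv_min_head L hLs
  by_cases hn : non_dup.length ≠ 0
  · rw [if_pos hn, hminL]
  · rw [if_neg hn]
    have h0 : non_dup = [] := by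
      rcases non_dup with _ | ⟨h, t⟩
      · rfl
      · simp at hn
    have hL0 : L = [] := by
      rcases hLe : L with _ | ⟨h, t⟩
      · rfl
      · have : h ∈ non_dup := (hmemL h).1 (by rw [hLe]; exact List.mem_cons_self)
        rw [h0] at this; cases this
    rw [hL0]; rfl

-- ===== VERDICT =====
theorem smallest_back_spec : Claim_equal_smallest_back := by
  intro front back _ hp
  exact smallest_back_eq front back hp
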